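-- pv_equiv track=rewrite | github.com/shubofan/LeetcodePython | Two Pointers/809.Expressive Words.py | isStretchy
-- ===== SOURCE A (Python) =====
-- def isStretchy(s, word):
-- 	# get length of repeats letters in s start from i
-- 	def getRepeat(s, i):
-- 		j = i
-- 		while j < len(s):
-- 			if s[i] == s[j]:
-- 				j += 1
-- 			else:
-- 				break
-- 		return j - i
--
-- 	i, j = 0, 0
-- 	while i < len(s) and j < len(word):
-- 		if s[i] != word[j]:
-- 			return False
--
-- 		l1, l2 = getRepeat(s, i), getRepeat(word, j)
--
-- 		# repeats < 3, l1 must == l2, otherwise like aa, a, return fasle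
-- 		# repeats >= 3, however, l1 < l2, like aaa, aaaa, return false
-- 		if l1 < 3 and l1 != l2 or l1 >= 3 and l1 < l2:
-- 			return False
--
-- 		i += l1
-- 		j += l2
--
-- 	return i == len(s) and j == len(word)  # check if both two pointers reach the end of two strings
-- ===== SOURCE B (Python) =====
-- def isStretchy(s, word):
--     def rle(t):
--         groups = []
--         for ch in t:
--             if groups and groups[-1][0] == ch:
--                 groups[-1][1] += 1
--             else:
--                 groups.append([ch, 1])
--         return groups
--
--     gs, gw = rle(s), rle(word)
--     if len(gs) != len(gw):
--         return False
--     for (c1, n1), (c2, n2) in zip(gs, gw):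
--         if c1 != c2 or (n1 < 3 and n1 != n2) or (n1 >= 3 and n1 < n2):
--             return False
--     return True
-- ===== Notes on version B (the rewrite author's own statement) =====
-- stated objective: simpler
-- what changed: B run-length-encodes each string once into (char, count) group lists and then compares the two group lists pairwise after a length check, instead of A's simultaneous two-pointer scan that re-counts runs in both strings inside one interleaved while loop.
import Mathlib
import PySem

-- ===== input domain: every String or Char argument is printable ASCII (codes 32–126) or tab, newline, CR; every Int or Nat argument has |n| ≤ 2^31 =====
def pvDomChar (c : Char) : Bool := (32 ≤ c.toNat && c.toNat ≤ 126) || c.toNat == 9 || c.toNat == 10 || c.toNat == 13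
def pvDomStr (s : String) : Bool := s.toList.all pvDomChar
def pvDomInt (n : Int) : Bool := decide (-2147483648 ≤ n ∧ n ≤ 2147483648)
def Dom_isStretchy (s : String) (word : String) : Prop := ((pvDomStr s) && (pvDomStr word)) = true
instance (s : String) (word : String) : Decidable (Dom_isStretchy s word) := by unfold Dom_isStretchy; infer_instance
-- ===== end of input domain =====

-- B run-length-encodes both strings once and compares the group lists; a simpler
-- decomposition than A's simultaneous two-pointer scan (same cost, no speed claim).

-- ===== PORT A =====
-- inner helper getRepeat: while j < len(s): if s[i]==s[j]: j += 1 else break; return j - i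
def pyRepGo (c : Option Char) : List Char → Nat
  | [] => 0
  | x :: rest => if c = some x then 1 + pyRepGo c rest else 0

def pyGetRepeat (l : List Char) (i : Nat) : Nat := pyRepGo l[i]? (l.drop i)

theorem pyGetRepeat_pos (l : List Char) (i : Nat) (h : i < l.length) :
    1 ≤ pyGetRepeat l i := by
  unfold pyGetRepeat
  rw [List.drop_eq_getElem_cons h, List.getElem?_eq_getElem h]
  simp [pyRepGo]

-- the main while loop over the two indices i, j
def loopA (s w : List Char) (i j : Nat) : Bool :=
  if h : i < s.length ∧ j < w.length then
    if s[i]? ≠ w[j]? then false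
    else
      let l1 := pyGetRepeat s i
      let l2 := pyGetRepeat w j
      if (l1 < 3 ∧ l1 ≠ l2) ∨ (3 ≤ l1 ∧ l1 < l2) then false
      else loopA s w (i + l1) (j + l2)
  else decide (i = s.length ∧ j = w.length)
termination_by s.length - i
decreasing_by
  have := pyGetRepeat_pos s i h.1
  omega

def isStretchy (s : String) (word : String) : Bool :=
  loopA s.toList word.toList 0 0

-- ===== PORT B =====
-- rle: for ch in t: increment the current (last) group or start a new one.
-- Python appends at the end and bumps groups[-1]; the port keeps the group list
-- reversed (head = current group) and reverses once at the end.
def rleStep (acc : List (Char × Nat)) (ch : Char) : List (Char × Nat) :=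
  match acc with
  | (c, n) :: rest => if c = ch then (c, n + 1) :: rest else (ch, 1) :: (c, n) :: rest
  | [] => [(ch, 1)]

def rleFold (t : List Char) : List (Char × Nat) := (t.foldl rleStep []).reverse

def isStretchy_alt (s : String) (word : String) : Bool :=
  let gs := rleFold s.toList
  let gw := rleFold word.toList
  if gs.length ≠ gw.length then false
  else (gs.zip gw).all fun p =>
    decide (¬(p.1.1 ≠ p.2.1 ∨ (p.1.2 < 3 ∧ p.1.2 ≠ p.2.2) ∨ (3 ≤ p.1.2 ∧ p.1.2 < p.2.2)))

-- ===== PRECONDITION & SPEC =====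
def Spec_isStretchy (s : String) (word : String) (out : Bool) : Prop := out = isStretchy_alt s word
instance (s : String) (word : String) (out : Bool) : Decidable (Spec_isStretchy s word out) := by unfold Spec_isStretchy; infer_instance

-- ===== CLAIM (what is proved, stated in full; the proofs are below) =====
def Claim_equal_isStretchy : Prop := ∀ (s : String) (word : String), Dom_isStretchy s word → Spec_isStretchy s word (isStretchy s word)

-- ===== LEMMAS AND PROOFS =====

-- number of leading occurrences of c in t
def cnt (c : Char) (t : List Char) : Nat := (t.takeWhile (· == c)).length

-- recursive characterisation of run-length encoding
def rleRec : List Char → List (Char × Nat)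
  | [] => []
  | c :: rest => (c, cnt c rest + 1) :: rleRec (rest.drop (cnt c rest))
termination_by l => l.length
decreasing_by
  simp only [List.length_drop, List.length_cons]
  omega

-- simultaneous-recursion comparison of two group lists
def check2 : List (Char × Nat) → List (Char × Nat) → Bool
  | [], [] => true
  | (c1, n1) :: t1, (c2, n2) :: t2 =>
    if c1 ≠ c2 then false
    else if (n1 < 3 ∧ n1 ≠ n2) ∨ (3 ≤ n1 ∧ n1 < n2) then false
    else check2 t1 t2
  | _, _ => false

theorem cnt_cons_self' (c : Char) (t : List Char) : cnt c (c :: t) = cnt c t + 1 := by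
  simp [cnt]

theorem cnt_le (c : Char) (t : List Char) : cnt c t ≤ t.length := by
  induction t with
  | nil => simp [cnt]
  | cons x r ih =>
    by_cases h : x = c
    · simp only [cnt, List.takeWhile_cons, h, beq_self_eq_true] at *
      simp at *
      omega
    · simp [cnt, beq_iff_eq, h]

theorem cnt_cons_ne (c x : Char) (t : List Char) (h : ¬ c = x) : cnt c (x :: t) = 0 := by
  simp [cnt, beq_iff_eq, Ne.symm h]

theorem drop_cnt_head (c : Char) (t : List Char) :
    (t.drop (cnt c t)).head? ≠ some c := by
  induction t with
  | nil => simp [cnt]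
  | cons x rest ih =>
    by_cases hx : x = c
    · subst hx
      rw [cnt_cons_self']
      simpa using ih
    · rw [cnt_cons_ne c x rest (fun h => hx h.symm)]
      simp [hx]

-- the fold over a run of c's just increments the current group
theorem foldl_run (t : List Char) (c : Char) (n : Nat) (rest : List (Char × Nat)) :
    List.foldl rleStep ((c, n) :: rest) t =
      List.foldl rleStep ((c, n + cnt c t) :: rest) (t.drop (cnt c t)) := by
  induction t generalizing n with
  | nil => simp [cnt]
  | cons x t' ih =>
    by_cases hx : c = x
    · subst hx
      rw [cnt_cons_self']
      have hstep : List.foldl rleStep ((c, n) :: rest) (c :: t') =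
          List.foldl rleStep ((c, n + 1) :: rest) t' := by
        simp [rleStep]
      rw [hstep, ih (n + 1), List.drop_succ_cons]
      have : n + 1 + cnt c t' = n + (cnt c t' + 1) := by omega
      rw [this]
    · rw [cnt_cons_ne c x t' hx]
      simp

theorem foldl_rle_eq (k : Nat) (t : List Char) (acc : List (Char × Nat))
    (hk : t.length ≤ k)
    (hacc : ∀ c n rest, acc = (c, n) :: rest → t.head? ≠ some c) :
    (List.foldl rleStep acc t).reverse = acc.reverse ++ rleRec t := by
  induction k generalizing t acc with
  | zero =>
    have : t = [] := by
      cases t with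
      | nil => rfl
      | cons a b => simp at hk
    subst this; simp [rleRec]
  | succ k ih =>
    cases t with
    | nil => simp [rleRec]
    | cons x t' =>
      have hstep : List.foldl rleStep acc (x :: t') =
          List.foldl rleStep ((x, 1) :: acc) t' := by
        cases acc with
        | nil => simp [rleStep]
        | cons p rest =>
          obtain ⟨c, n⟩ := p
          have hne : c ≠ x := by
            intro hcx
            exact (hacc c n rest rfl) (by simp [hcx])
          simp [rleStep, hne]
      rw [hstep, foldl_run t' x 1]
      have hlen : (t'.drop (cnt x t')).length ≤ k := by
        have := cnt_le x t'
        simp only [List.length_drop]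
        simp only [List.length_cons] at hk
        omega
      rw [ih (t'.drop (cnt x t')) ((x, 1 + cnt x t') :: acc) hlen
        (by
          intro c n rest hr
          have h1 : c = x := by
            have := congrArg List.head? hr
            simp at hr
            exact hr.1.1.symm ▸ rfl
          subst h1
          exact drop_cnt_head c t')]
      rw [show rleRec (x :: t') = (x, cnt x t' + 1) :: rleRec (t'.drop (cnt x t')) from by rw [rleRec]]
      simp [Nat.add_comm]

theorem rleFold_eq_rleRec (t : List Char) : rleFold t = rleRec t := by
  unfold rleFold
  rw [foldl_rle_eq t.length t [] le_rfl (by intro c n rest h; simp at h)]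
  simp

-- the length-check + zip/all of B equals the simultaneous recursion check2
theorem zip_all_eq_check2 (a b : List (Char × Nat)) :
    (if a.length ≠ b.length then false
     else (a.zip b).all fun p =>
       decide (¬(p.1.1 ≠ p.2.1 ∨ (p.1.2 < 3 ∧ p.1.2 ≠ p.2.2) ∨ (3 ≤ p.1.2 ∧ p.1.2 < p.2.2))))
    = check2 a b := by
  induction a generalizing b with
  | nil =>
    cases b with
    | nil => simp [check2]
    | cons y b' => simp [check2]
  | cons x a' ih =>
    cases b with
    | nil => simp [check2]
    | cons y b' =>
      obtain ⟨c1, n1⟩ := x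
      obtain ⟨c2, n2⟩ := y
      have hd : (decide ¬(c1 ≠ c2 ∨ (n1 < 3 ∧ n1 ≠ n2) ∨ (3 ≤ n1 ∧ n1 < n2)))
          = (if c1 ≠ c2 then false
             else if (n1 < 3 ∧ n1 ≠ n2) ∨ (3 ≤ n1 ∧ n1 < n2) then false else true) := by
        by_cases hc : c1 = c2
        · by_cases hn : (n1 < 3 ∧ n1 ≠ n2) ∨ (3 ≤ n1 ∧ n1 < n2) <;> simp [hc, hn]
        · simp [hc]
      simp only [check2, List.zip_cons_cons, List.all_cons, hd, List.length_cons]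
      by_cases hlen : a'.length = b'.length
      · have hall : ((a'.zip b').all fun p =>
            decide (¬(p.1.1 ≠ p.2.1 ∨ (p.1.2 < 3 ∧ p.1.2 ≠ p.2.2) ∨ (3 ≤ p.1.2 ∧ p.1.2 < p.2.2))))
            = check2 a' b' := by
          have h := ih b'
          rwa [if_neg (by simpa using hlen)] at h
        rw [if_neg (by omega), hall]
        split_ifs <;> simp
      · have hall : check2 a' b' = false := by
          rw [← ih b', if_pos (by simpa using hlen)]
        rw [if_pos (by omega)]
        split_ifs <;> simp [hall]

-- pyGetRepeat in terms of cnt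
theorem pyGetRepeat_eq (l : List Char) (i : Nat) (h : i < l.length) :
    pyGetRepeat l i = cnt l[i] (l.drop (i + 1)) + 1 := by
  unfold pyGetRepeat
  rw [List.drop_eq_getElem_cons h, List.getElem?_eq_getElem h]
  have key : ∀ (t : List Char) (c : Char), pyRepGo (some c) t = cnt c t := by
    intro t c
    induction t with
    | nil => simp [pyRepGo, cnt]
    | cons x rest ih =>
      by_cases hx : c = x
      · subst hx; simp [pyRepGo, cnt, ih]; omega
      · simp [pyRepGo, cnt, hx, Ne.symm hx]
  simp [pyRepGo, key]
  omega

theorem rleRec_drop (l : List Char) (i : Nat) (h : i < l.length) :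
    rleRec (l.drop i) = (l[i], pyGetRepeat l i) :: rleRec (l.drop (i + pyGetRepeat l i)) := by
  rw [List.drop_eq_getElem_cons h, rleRec, pyGetRepeat_eq l i h, List.drop_drop]
  have hidx : i + 1 + cnt l[i] (l.drop (i + 1)) = i + (cnt l[i] (l.drop (i + 1)) + 1) := by omega
  rw [hidx]

theorem pyGetRepeat_bound (l : List Char) (i : Nat) (h : i < l.length) :
    i + pyGetRepeat l i ≤ l.length := by
  rw [pyGetRepeat_eq l i h]
  have h2 := cnt_le l[i] (l.drop (i + 1))
  rw [List.length_drop] at h2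
  omega

theorem loopA_eq_check2 (n : Nat) (s w : List Char) (i j : Nat)
    (hn : s.length - i ≤ n) (hi : i ≤ s.length) (hj : j ≤ w.length) :
    loopA s w i j = check2 (rleRec (s.drop i)) (rleRec (w.drop j)) := by
  induction n generalizing i j with
  | zero =>
    have hie : i = s.length := by omega
    subst hie
    rw [loopA]
    rcases Nat.lt_or_ge j w.length with hjlt | hjge
    · rw [dif_neg (by omega), rleRec_drop w j hjlt]
      simp [List.drop_length, rleRec, check2]
      omega
    · have : j = w.length := by omega
      subst this
      simp [List.drop_length, rleRec, check2]
  | succ n ih =>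
    rcases Nat.lt_or_ge i s.length with hilt | hige
    · rcases Nat.lt_or_ge j w.length with hjlt | hjge
      · rw [loopA, dif_pos ⟨hilt, hjlt⟩]
        rw [rleRec_drop s i hilt, rleRec_drop w j hjlt]
        rw [List.getElem?_eq_getElem hilt, List.getElem?_eq_getElem hjlt]
        by_cases hc : s[i] = w[j]
        · rw [if_neg (by simp [hc])]
          by_cases hcond : (pyGetRepeat s i < 3 ∧ pyGetRepeat s i ≠ pyGetRepeat w j) ∨
              (3 ≤ pyGetRepeat s i ∧ pyGetRepeat s i < pyGetRepeat w j)
          · rw [if_pos hcond]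
            simp [check2, hc, hcond]
          · rw [if_neg hcond]
            have h1 := pyGetRepeat_pos s i hilt
            have h2 := pyGetRepeat_bound s i hilt
            have h3 := pyGetRepeat_bound w j hjlt
            rw [ih (i + pyGetRepeat s i) (j + pyGetRepeat w j) (by omega) (by omega) (by omega)]
            simp [check2, hc, hcond]
        · rw [if_pos (by simp [hc])]
          simp [check2, hc]
      · have : j = w.length := by omega
        subst this
        rw [loopA, dif_neg (by omega)]
        rw [rleRec_drop s i hilt]
        simp [List.drop_length, rleRec, check2]
        omega
    · have hie : i = s.length := by omega
      subst hie
      rw [loopA]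
      rcases Nat.lt_or_ge j w.length with hjlt | hjge
      · rw [dif_neg (by omega), rleRec_drop w j hjlt]
        simp [List.drop_length, rleRec, check2]
        omega
      · have hje : j = w.length := by omega
        subst hje
        simp [List.drop_length, rleRec, check2]

-- ===== VERDICT (by name: the statement is the Claim_ definition above) =====
theorem isStretchy_spec : Claim_equal_isStretchy := by
  intro s word _
  show isStretchy s word = isStretchy_alt s word
  simp only [isStretchy, isStretchy_alt, rleFold_eq_rleRec]
  rw [zip_all_eq_check2]
  have h := loopA_eq_check2 s.toList.length s.toList word.toList 0 0 (by omega) (by omega) (by omega)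
  simpa using h
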